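-- pv_equiv track=rewrite | github.com/ErikCohenDev/advent-of-code-2023 | day1.py | convert_spelled_out_numbers_into_numbers
-- ===== SOURCE A (Python) =====
-- def has_spelled_out_numbers(string):
--     """Returns a List of numbers up to 9 that are spelled out in the string"""
--     spelled_out_numbers = [
--         "zero", "one", "two", "three", "four", "five", "six", "seven", "eight", "nine"
--     ]
--     found_numbers = []
--
--     for start_index in range(len(string)):
--         for number, spelled_out_number in enumerate(spelled_out_numbers):
--             if string[start_index:].startswith(spelled_out_number):
--                 found_numbers.append(number)
--
--     return found_numbers
--
-- def convert_spelled_out_numbers_into_numbers(arr):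
--     just_digits = []
--     for text in arr:
--         if text.isdigit():
--             just_digits.append(int(text))
--         else:
--             spelled_out_numbers = has_spelled_out_numbers(text)
--             if len(spelled_out_numbers) > 0:
--                 just_digits = just_digits + spelled_out_numbers
--     return just_digits
-- ===== SOURCE B (Python) =====
-- SPELLED_OUT_NUMBERS = [
--     "zero", "one", "two", "three", "four", "five", "six", "seven", "eight", "nine"
-- ]
--
-- def spelled_out_number_index(text):
--     """All (position, digit) matches of spelled-out words, collected word by word
--     with repeated str.find (start = pos + 1 keeps overlapping matches), then
--     sorted by position so the digits come out in left-to-right order."""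
--     matches = []
--     for number, word in enumerate(SPELLED_OUT_NUMBERS):
--         pos = text.find(word)
--         while pos != -1:
--             matches.append((pos, number))
--             pos = text.find(word, pos + 1)
--     matches.sort(key=lambda m: m[0])
--     return [number for _, number in matches]
--
-- def convert_spelled_out_numbers_into_numbers(arr):
--     just_digits = []
--     for text in arr:
--         if text.isdigit():
--             just_digits.append(int(text))
--         else:
--             just_digits += spelled_out_number_index(text)
--     return just_digits
-- ===== Notes on version B (the rewrite author's own statement) =====
-- stated objective: alternative
-- what changed: Per string, the position-by-position scan testing all ten words at each index is replaced by a word-centric index build: for each spelled-out word all occurrences are collected with repeated str.find (start = pos+1, so overlapping matches survive), the (position, digit) pairs are sorted by position, and the digits are emitted in that order.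
import Mathlib
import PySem

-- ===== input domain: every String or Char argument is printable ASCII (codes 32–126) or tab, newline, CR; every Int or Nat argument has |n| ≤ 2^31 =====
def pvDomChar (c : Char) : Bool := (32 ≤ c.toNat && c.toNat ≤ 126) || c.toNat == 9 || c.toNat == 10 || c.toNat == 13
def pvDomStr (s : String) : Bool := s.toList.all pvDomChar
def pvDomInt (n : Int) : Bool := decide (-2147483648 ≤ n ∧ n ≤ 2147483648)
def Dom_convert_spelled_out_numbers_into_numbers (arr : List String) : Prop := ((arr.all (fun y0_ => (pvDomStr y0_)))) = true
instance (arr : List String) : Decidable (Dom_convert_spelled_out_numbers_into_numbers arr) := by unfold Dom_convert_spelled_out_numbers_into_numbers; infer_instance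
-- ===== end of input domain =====

-- B replaces A's position-by-position scan (testing all ten words at every index) by a
-- word-centric index build: all occurrences of each word via repeated find, sorted by position.

def pvSpelledWords : List (List Char) :=
  ["zero".toList, "one".toList, "two".toList, "three".toList, "four".toList,
   "five".toList, "six".toList, "seven".toList, "eight".toList, "nine".toList]

-- ===== PORT A =====
def has_spelled_out_numbers (s : List Char) : List Int :=
  (List.range s.length).foldl (fun found i =>
    (PySem.List.enumerate pvSpelledWords).foldl (fun found2 nw =>
      if PySem.Chars.startswith (s.drop i) nw.2 then found2 ++ [nw.1] else found2) found) []

def convert_spelled_out_numbers_into_numbers (arr : List String) : List Int :=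
  arr.foldl (fun jd text =>
    if PySem.Str.strIsdigit text then jd ++ [(PySem.Int.ofStr? text).getD 0]
    else
      let sp := has_spelled_out_numbers text.toList
      if sp.length > 0 then jd ++ sp else jd) []

-- ===== PORT B =====
-- the Python 'while pos != -1' loop; fuel s.length + 1 bounds the number of iterations
def pvFindLoop (s w : List Char) : Nat → Int → List (Int × Int) → Int → List (Int × Int)
  | 0, _, acc, _ => acc
  | fuel+1, pos, acc, number =>
    if pos = -1 then acc
    else pvFindLoop s w fuel (PySem.Chars.findFrom s w (pos + 1) none) (acc ++ [(pos, number)]) number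

def spelled_out_number_index (text : String) : List Int :=
  let s := text.toList
  let ms := (PySem.List.enumerate pvSpelledWords).foldl (fun acc nw =>
    pvFindLoop s nw.2 (s.length + 1) (PySem.Chars.find s nw.2) acc nw.1) []
  (PySem.List.sorted ms (fun m => m.1) false).map (fun m => m.2)

def convert_spelled_out_numbers_into_numbers_alt (arr : List String) : List Int :=
  arr.foldl (fun jd text =>
    if PySem.Str.strIsdigit text then jd ++ [(PySem.Int.ofStr? text).getD 0]
    else jd ++ spelled_out_number_index text) []

-- ===== PRECONDITION & SPEC =====
def Spec_convert_spelled_out_numbers_into_numbers (arr : List String) (out : List Int) : Prop := out = convert_spelled_out_numbers_into_numbers_alt arr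
instance (arr : List String) (out : List Int) : Decidable (Spec_convert_spelled_out_numbers_into_numbers arr out) := by unfold Spec_convert_spelled_out_numbers_into_numbers; infer_instance

-- ===== CLAIM (what is proved, stated in full; the proofs are below) =====
def Claim_equal_convert_spelled_out_numbers_into_numbers : Prop := ∀ (arr : List String), Dom_convert_spelled_out_numbers_into_numbers arr → Spec_convert_spelled_out_numbers_into_numbers arr (convert_spelled_out_numbers_into_numbers arr)

-- ===== LEMMAS AND PROOFS =====

-- the word table: no word is a prefix of another, indices are distinct, words nonempty
def pvE : List (Int × List Char) := PySem.List.enumerate pvSpelledWords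

theorem pvE_ne : ∀ nw ∈ pvE, nw.2 ≠ [] := by decide
theorem pvE_prefix : ∀ a ∈ pvE, ∀ b ∈ pvE, a.2 <+: b.2 → a = b := by decide
theorem pvE_fst : ∀ a ∈ pvE, ∀ b ∈ pvE, a.1 = b.1 → a = b := by decide
theorem pvE_nodup : pvE.Nodup := by decide

-- occurrence positions of w in s, and the two pair lists the programs build
def pvOcc (s w : List Char) : List Nat :=
  (List.range s.length).filter (fun i => PySem.Chars.startswith (s.drop i) w)

def pvBlockW (s : List Char) (i : Nat) : List (Int × List Char) :=
  pvE.filter (fun nw => PySem.Chars.startswith (s.drop i) nw.2)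

def pvPairs (s : List Char) : List (Int × Int) :=
  (List.range s.length).flatMap (fun i => (pvBlockW s i).map (fun nw => ((i : Int), nw.1)))

def pvMs (s : List Char) : List (Int × Int) :=
  pvE.flatMap (fun nw => (pvOcc s nw.2).map (fun (p : Nat) => ((p : Int), nw.1)))

theorem filter_len_le_one {α : Type} (l : List α) (p : α → Bool) (hnd : l.Nodup)
    (h : ∀ a ∈ l, ∀ b ∈ l, p a → p b → a = b) : (l.filter p).length ≤ 1 := by
  induction l with
  | nil => simp
  | cons a l ih =>
    rcases List.nodup_cons.mp hnd with ⟨ha, hnd'⟩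
    by_cases hpa : p a
    · have hnil : l.filter p = [] := by
        apply List.filter_eq_nil_iff.mpr
        intro b hb hpb
        have : a = b := h a (.head _) b (.tail _ hb) hpa hpb
        exact absurd (this ▸ hb) ha
      simp [hpa, hnil]
    · simp only [List.filter_cons, hpa]
      exact ih hnd' (fun x hx y hy => h x (.tail _ hx) y (.tail _ hy))

theorem blockW_len (s : List Char) (i : Nat) : (pvBlockW s i).length ≤ 1 := by
  apply filter_len_le_one _ _ pvE_nodup
  intro a ha b hb hpa hpb
  have ha' := (PySem.Chars.startswith_iff _ _).mp hpa
  have hb' := (PySem.Chars.startswith_iff _ _).mp hpb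
  rcases List.prefix_or_prefix_of_prefix ha' hb' with h | h
  · exact pvE_prefix a ha b hb h
  · exact (pvE_prefix b hb a ha h).symm

theorem pairwise_flatMap_range {f : Nat → List (Int × Int)} (hlen : ∀ i, (f i).length ≤ 1)
    (hkey : ∀ i, ∀ y ∈ f i, y.1 = (i : Int)) (n : Nat) :
    ((List.range n).flatMap f).Pairwise (fun a b => a.1 < b.1) := by
  induction n with
  | zero => simp
  | succ n ih =>
    rw [List.range_succ, List.flatMap_append]
    apply List.pairwise_append.mpr
    refine ⟨ih, ?_, ?_⟩
    · have hl := hlen n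
      have : (List.flatMap f [n]) = f n := by simp [List.flatMap]
      rw [this]
      match hfn : f n with
      | [] => exact .nil
      | [y] => exact .cons (by simp) .nil
      | y :: z :: t => rw [hfn] at hl; simp at hl
    · intro a ha b hb
      rcases List.mem_flatMap.mp ha with ⟨i, hi, hai⟩
      have hb' : b ∈ f n := by simpa [List.flatMap] using hb
      rw [hkey i a hai, hkey n b hb']
      exact_mod_cast List.mem_range.mp hi

theorem pairwise_pairs (s : List Char) : (pvPairs s).Pairwise (fun a b => a.1 < b.1) := by
  apply pairwise_flatMap_range
  · intro i
    rw [List.length_map]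
    exact blockW_len s i
  · intro i y hy
    rcases List.mem_map.mp hy with ⟨nw, _, rfl⟩
    rfl

theorem nodup_flatMap_of {α β γ : Type} (l : List α) (f : α → List β) (g : α → γ) (key : β → γ)
    (hl : l.Nodup) (hginj : ∀ a ∈ l, ∀ b ∈ l, g a = g b → a = b)
    (hkey : ∀ a ∈ l, ∀ y ∈ f a, key y = g a) (hf : ∀ a ∈ l, (f a).Nodup) :
    (l.flatMap f).Nodup := by
  induction l with
  | nil => simp
  | cons a l ih =>
    rw [List.flatMap_cons]
    rcases List.nodup_cons.mp hl with ⟨ha, hnd⟩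
    refine List.Nodup.append (hf a (.head _)) ?_ ?_
    · exact ih hnd (fun x hx y hy => hginj x (.tail _ hx) y (.tail _ hy))
        (fun x hx => hkey x (.tail _ hx)) (fun x hx => hf x (.tail _ hx))
    · intro y hy1 hy2
      rcases List.mem_flatMap.mp hy2 with ⟨b, hb, hyb⟩
      have h1 : key y = g a := hkey a (.head _) y hy1
      have h2 : key y = g b := hkey b (.tail _ hb) y hyb
      have : a = b := hginj a (.head _) b (.tail _ hb) (h1.symm.trans h2)
      exact absurd (this ▸ hb) ha

theorem nodup_ms (s : List Char) : (pvMs s).Nodup := by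
  apply nodup_flatMap_of pvE _ (fun nw => nw.1) (fun y => y.2) pvE_nodup pvE_fst
  · intro nw _ y hy
    rcases List.mem_map.mp hy with ⟨p, _, rfl⟩
    rfl
  · intro nw _
    have h1 : (pvOcc s nw.2).Nodup := List.Nodup.filter _ List.nodup_range
    have hinj : Function.Injective (fun (p : Nat) => ((p : Int), nw.1)) := by
      intro p q hpq
      have h : (p : Int) = (q : Int) := congrArg Prod.fst hpq
      exact_mod_cast h
    exact h1.map hinj

theorem nodup_pairs (s : List Char) : (pvPairs s).Nodup := by
  apply List.Pairwise.imp _ (pairwise_pairs s)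
  intro a b h heq
  rw [heq] at h
  exact lt_irrefl _ h

theorem mem_ms_iff (s : List Char) (y : Int × Int) : y ∈ pvMs s ↔ y ∈ pvPairs s := by
  unfold pvMs pvPairs pvOcc pvBlockW
  constructor
  · intro hy
    rcases List.mem_flatMap.mp hy with ⟨nw, hnw, hy2⟩
    rcases List.mem_map.mp hy2 with ⟨p, hp, rfl⟩
    rcases List.mem_filter.mp hp with ⟨hpr, hsw⟩
    exact List.mem_flatMap.mpr ⟨p, hpr, List.mem_map.mpr ⟨nw, List.mem_filter.mpr ⟨hnw, hsw⟩, rfl⟩⟩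
  · intro hy
    rcases List.mem_flatMap.mp hy with ⟨i, hi, hy2⟩
    rcases List.mem_map.mp hy2 with ⟨nw, hnw, rfl⟩
    rcases List.mem_filter.mp hnw with ⟨hnwE, hsw⟩
    exact List.mem_flatMap.mpr ⟨nw, hnwE, List.mem_map.mpr ⟨i, List.mem_filter.mpr ⟨hi, hsw⟩, rfl⟩⟩

-- characterisation of the find loop: it collects, in increasing order, every position ≥ k
-- at which w occurs
theorem loop_eq (s w : List Char) (hw : w ≠ []) (number : Int) (fuel k : Nat) (acc : List (Int × Int))
    (hk : k ≤ s.length) (hfuel : s.length + 1 - k ≤ fuel) :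
    pvFindLoop s w fuel (PySem.Chars.findFrom s w ((k : Nat) : Int) none) acc number
      = acc ++ ((List.range s.length).filter
          (fun i => decide (k ≤ i) && PySem.Chars.startswith (s.drop i) w)).map
          (fun (i : Nat) => ((i : Int), number)) := by
  induction fuel generalizing k acc with
  | zero => omega
  | succ fuel ih =>
    by_cases hp : PySem.Chars.findFrom s w ((k : Nat) : Int) none = -1
    · rw [pvFindLoop, if_pos hp]
      have hnot : ¬ w <:+: s.drop k := (PySem.Chars.findFrom_natCast_eq_neg_one_iff s w k hk).mp hp
      have hnil : ((List.range s.length).filter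
          (fun i => decide (k ≤ i) && PySem.Chars.startswith (s.drop i) w)) = [] := by
        apply List.filter_eq_nil_iff.mpr
        intro i _hi hb
        simp only [Bool.and_eq_true, decide_eq_true_eq] at hb
        obtain ⟨hki', hsw⟩ := hb
        have hpre : w <+: s.drop i := (PySem.Chars.startswith_iff _ _).mp hsw
        have hdd : (s.drop k).drop (i - k) = s.drop i := by
          rw [List.drop_drop]
          congr 1
          omega
        rw [← hdd] at hpre
        exact hnot (hpre.isInfix.trans (List.drop_suffix (i - k) (s.drop k)).isInfix)
      rw [hnil]
      simp
    · obtain ⟨h1, h2, h3⟩ := PySem.Chars.findFrom_natCast_spec s w k hk hp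
      set p := PySem.Chars.findFrom s w ((k : Nat) : Int) none with hpdef
      have hp0 : 0 ≤ p := le_trans (by exact_mod_cast Nat.zero_le k) h1
      set m := p.toNat with hmdef
      have hpm : p = (m : Int) := (Int.toNat_of_nonneg hp0).symm
      have hkm : k ≤ m := by omega
      have hmlen : m < s.length := by
        by_contra hge
        have : s.drop m = [] := List.drop_eq_nil_of_le (by omega)
        rw [this] at h2
        exact hw (List.prefix_nil.mp h2)
      rw [pvFindLoop, if_neg hp]
      have hcast : p + 1 = (((m + 1 : Nat)) : Int) := by omega
      rw [hcast, ih (m + 1) (acc ++ [(p, number)]) (by omega) (by omega)]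
      have hsplit : ((List.range s.length).filter
            (fun i => decide (k ≤ i) && PySem.Chars.startswith (s.drop i) w))
          = m :: ((List.range s.length).filter
            (fun i => decide (m + 1 ≤ i) && PySem.Chars.startswith (s.drop i) w)) := by
        have hlen' : s.length = (m + 1) + (s.length - (m + 1)) := by omega
        have hr : List.range s.length
            = List.range (m + 1) ++ (List.range (s.length - (m + 1))).map (fun j => (m + 1) + j) := by
          conv_lhs => rw [hlen']
          exact List.range_add
        rw [hr, List.filter_append, List.filter_append]
        have e1 : (List.range (m + 1)).filter
            (fun i => decide (k ≤ i) && PySem.Chars.startswith (s.drop i) w) = [m] := by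
          rw [List.range_succ, List.filter_append]
          have e11 : (List.range m).filter
              (fun i => decide (k ≤ i) && PySem.Chars.startswith (s.drop i) w) = [] := by
            apply List.filter_eq_nil_iff.mpr
            intro i hi hb
            simp only [Bool.and_eq_true, decide_eq_true_eq] at hb
            exact h3 i hb.1 (by have := List.mem_range.mp hi; omega)
              ((PySem.Chars.startswith_iff _ _).mp hb.2)
          have e12 : ([m]).filter
              (fun i => decide (k ≤ i) && PySem.Chars.startswith (s.drop i) w) = [m] := by
            have : PySem.Chars.startswith (s.drop m) w = true :=
              (PySem.Chars.startswith_iff _ _).mpr h2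
            simp [List.filter, hkm, this]
          rw [e11, e12, List.nil_append]
        have e2 : (List.range (m + 1)).filter
            (fun i => decide (m + 1 ≤ i) && PySem.Chars.startswith (s.drop i) w) = [] := by
          apply List.filter_eq_nil_iff.mpr
          intro i hi hb
          simp only [Bool.and_eq_true, decide_eq_true_eq] at hb
          have := List.mem_range.mp hi
          omega
        have e3 : ((List.range (s.length - (m + 1))).map (fun j => (m + 1) + j)).filter
              (fun i => decide (k ≤ i) && PySem.Chars.startswith (s.drop i) w)
            = ((List.range (s.length - (m + 1))).map (fun j => (m + 1) + j)).filter
              (fun i => decide (m + 1 ≤ i) && PySem.Chars.startswith (s.drop i) w) := by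
          apply List.filter_congr
          intro i hi
          rcases List.mem_map.mp hi with ⟨j, _, rfl⟩
          have hk' : k ≤ (m + 1) + j := by omega
          have hm' : m + 1 ≤ (m + 1) + j := by omega
          simp [hk', hm']
        rw [e1, e2, e3, List.nil_append]
        rfl
      rw [hsplit]
      simp [hpm, List.append_assoc]

theorem findAll_eq (s w : List Char) (hw : w ≠ []) (number : Int) (acc : List (Int × Int)) :
    pvFindLoop s w (s.length + 1) (PySem.Chars.find s w) acc number
      = acc ++ (pvOcc s w).map (fun (p : Nat) => ((p : Int), number)) := by
  have h0 : PySem.Chars.find s w = PySem.Chars.findFrom s w (((0 : Nat)) : Int) none := by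
    rw [Nat.cast_zero, PySem.Chars.findFrom_zero]
  rw [h0, loop_eq s w hw number (s.length + 1) 0 acc (Nat.zero_le _) (by omega)]
  have hf : (List.range s.length).filter
        (fun i => decide (0 ≤ i) && PySem.Chars.startswith (s.drop i) w)
      = pvOcc s w := by
    unfold pvOcc
    apply List.filter_congr
    intro i _
    simp
  rw [hf]

theorem ms_eq (s : List Char) :
    (PySem.List.enumerate pvSpelledWords).foldl (fun acc nw =>
        pvFindLoop s nw.2 (s.length + 1) (PySem.Chars.find s nw.2) acc nw.1) []
      = pvMs s := by
  have h : ∀ (E : List (Int × List Char)), (∀ nw ∈ E, nw.2 ≠ []) → ∀ (acc : List (Int × Int)),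
      E.foldl (fun acc nw => pvFindLoop s nw.2 (s.length + 1) (PySem.Chars.find s nw.2) acc nw.1) acc
        = acc ++ E.flatMap (fun nw => (pvOcc s nw.2).map (fun (p : Nat) => ((p : Int), nw.1))) := by
    intro E
    induction E with
    | nil => intro _ acc; simp
    | cons nw E ih =>
      intro hne acc
      rw [List.foldl_cons, List.flatMap_cons,
        findAll_eq s nw.2 (hne nw (.head _)) nw.1 acc,
        ih (fun x hx => hne x (.tail _ hx)), List.append_assoc]
  exact h _ pvE_ne []

theorem sorted_ms (s : List Char) :
    PySem.List.sorted (pvMs s) (fun m => m.1) false = pvPairs s := by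
  apply PySem.List.sorted_eq_of_perm_of_pairwise_lt
  · exact (List.perm_ext_iff_of_nodup (nodup_pairs s) (nodup_ms s)).mpr
      (fun y => (mem_ms_iff s y).symm)
  · exact pairwise_pairs s

theorem hasSpelled_eq (s : List Char) :
    has_spelled_out_numbers s = (pvPairs s).map (fun m => m.2) := by
  unfold has_spelled_out_numbers
  have hinner : ∀ (i : Nat) (acc : List Int),
      (PySem.List.enumerate pvSpelledWords).foldl (fun found2 nw =>
          if PySem.Chars.startswith (s.drop i) nw.2 then found2 ++ [nw.1] else found2) acc
        = acc ++ (pvBlockW s i).map (fun nw => nw.1) := by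
    intro i acc
    unfold pvBlockW pvE
    exact PySem.List.foldl_append_if _ _ _ _
  have houter : ∀ (r : List Nat) (acc : List Int),
      r.foldl (fun found i =>
          (PySem.List.enumerate pvSpelledWords).foldl (fun found2 nw =>
            if PySem.Chars.startswith (s.drop i) nw.2 then found2 ++ [nw.1] else found2) found) acc
        = acc ++ r.flatMap (fun i => (pvBlockW s i).map (fun nw => nw.1)) := by
    intro r
    induction r with
    | nil => intro acc; simp
    | cons i r ih =>
      intro acc
      rw [List.foldl_cons, hinner, List.flatMap_cons, ih, List.append_assoc]
  rw [houter]
  unfold pvPairs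
  rw [List.map_flatMap]
  simp only [List.map_map]
  rfl

theorem spelled_eq (text : String) :
    spelled_out_number_index text = has_spelled_out_numbers text.toList := by
  unfold spelled_out_number_index
  dsimp only
  rw [ms_eq, sorted_ms, hasSpelled_eq]

-- ===== VERDICT (by name: the statement is the Claim_ definition above) =====
theorem convert_spelled_out_numbers_into_numbers_spec : Claim_equal_convert_spelled_out_numbers_into_numbers := by
  intro arr _
  unfold Spec_convert_spelled_out_numbers_into_numbers
  unfold convert_spelled_out_numbers_into_numbers convert_spelled_out_numbers_into_numbers_alt
  apply PySem.List.foldl_congr_mem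
  intro jd text _
  by_cases hd : PySem.Str.strIsdigit text
  · rw [if_pos hd, if_pos hd]
  · rw [if_neg hd, if_neg hd]
    rw [spelled_eq]
    by_cases hsp : has_spelled_out_numbers text.toList = []
    · simp [hsp]
    · have : (has_spelled_out_numbers text.toList).length > 0 := List.length_pos_of_ne_nil hsp
      simp [this]
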